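-- pv_equiv track=rewrite | github.com/fcaponetto/advent_of_code | 2023/d03/02.py | extract_number_positions
-- ===== SOURCE A (Python) =====
-- def extract_number_positions(input_string: str) -> list:
--     """
--     It extracts the start and end position of a digit
--     :rtype: list of tuples that include start-end positions
--     """
--     result = []
--     current_number = ''
--     for i, char in enumerate(input_string):
--         if char.isdigit():
--             current_number += char
--         elif current_number:
--             result.append((i - len(current_number), i - 1, int(current_number)))
--             current_number = ''
--
--     # trailing number
--     if current_number:
--         result.append((len(input_string) - len(current_number), len(input_string) - 1, int(current_number)))
--
--     return result
-- ===== SOURCE B (Python) =====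
-- def extract_number_positions(input_string: str) -> list:
--     """Run-finder: locate each maximal digit run with a nested scan, no accumulator state machine."""
--     result = []
--     n = len(input_string)
--     i = 0
--     while i < n:
--         if input_string[i].isdigit():
--             j = i
--             while j < n and input_string[j].isdigit():
--                 j += 1
--             result.append((i, j - 1, int(input_string[i:j])))
--             i = j
--         else:
--             i += 1
--     return result
-- ===== Notes on version B (the rewrite author's own statement) =====
-- stated objective: alternative
-- what changed: Replaced A's single-pass accumulator state machine (growing a current-number string and a separate trailing-number flush) with a nested run-finder that, at each digit, scans forward to the run's end and slices/parses it in one step.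
import Mathlib
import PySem

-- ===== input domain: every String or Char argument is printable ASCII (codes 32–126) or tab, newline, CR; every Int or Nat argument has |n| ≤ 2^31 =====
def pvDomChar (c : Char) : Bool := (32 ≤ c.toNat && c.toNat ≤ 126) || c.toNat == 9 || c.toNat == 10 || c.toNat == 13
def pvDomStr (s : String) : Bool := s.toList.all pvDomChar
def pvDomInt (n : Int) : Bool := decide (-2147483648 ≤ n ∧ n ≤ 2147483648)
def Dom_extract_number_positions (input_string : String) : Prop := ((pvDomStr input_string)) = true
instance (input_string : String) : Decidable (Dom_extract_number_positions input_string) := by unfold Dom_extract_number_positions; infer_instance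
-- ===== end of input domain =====

-- B replaces A's accumulator state machine with a nested maximal-digit-run scanner (alternative, same cost).

-- int(cs): here always called on a nonempty all-digit string, so ofChars? is some
def pyIntOf (cs : List Char) : Int := (PySem.Int.ofChars? cs).getD 0

-- ===== PORT A =====
-- the for-loop of A: state (current_number, result), i the enumerate index
def aGo : List Char → Nat → List Char → List (Int × Int × Int) → List (Int × Int × Int) × List Char
  | [], _, cur, res => (res, cur)
  | c :: rest, i, cur, res =>
    if PySem.Chars.isdigit c then aGo rest (i + 1) (cur ++ [c]) res
    else if cur ≠ [] then
      aGo rest (i + 1) [] (res ++ [((i : Int) - cur.length, (i : Int) - 1, pyIntOf cur)])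
    else aGo rest (i + 1) cur res

def extract_number_positions (input_string : String) : List (Int × Int × Int) :=
  let cs := input_string.toList
  let p := aGo cs 0 [] []
  -- trailing number
  if p.2 ≠ [] then
    p.1 ++ [((cs.length : Int) - p.2.length, (cs.length : Int) - 1, pyIntOf p.2)]
  else p.1

-- ===== PORT B =====
-- B's outer while: at a digit, the inner while finds the run's end (takeWhile), slice+int it, jump past it
def altRun : List Char → Nat → List (Int × Int × Int)
  | [], _ => []
  | c :: rest, i =>
    if PySem.Chars.isdigit c then
      let run := (c :: rest).takeWhile PySem.Chars.isdigit
      ((i : Int), (i : Int) + run.length - 1, pyIntOf run) ::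
        altRun ((c :: rest).drop run.length) (i + run.length)
    else altRun rest (i + 1)
  termination_by cs _ => cs.length
  decreasing_by
    · simp only [List.takeWhile_cons, *, if_pos]
      simp
    · simp

def extract_number_positions_alt (input_string : String) : List (Int × Int × Int) :=
  altRun input_string.toList 0

-- ===== PRECONDITION & SPEC =====
def Spec_extract_number_positions (input_string : String) (out : List (Int × Int × Int)) : Prop := out = extract_number_positions_alt input_string
instance (input_string : String) (out : List (Int × Int × Int)) : Decidable (Spec_extract_number_positions input_string out) := by unfold Spec_extract_number_positions; infer_instance

-- ===== CLAIM (what is proved, stated in full; the proofs are below) =====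
def Claim_equal_extract_number_positions : Prop := ∀ (input_string : String), Dom_extract_number_positions input_string → Spec_extract_number_positions input_string (extract_number_positions input_string)

-- ===== LEMMAS AND PROOFS =====

-- A's loop followed by the trailing-number flush at index i + cs.length
def finishA (cs : List Char) (i : Nat) (cur : List Char) (res : List (Int × Int × Int)) :
    List (Int × Int × Int) :=
  let p := aGo cs i cur res
  if p.2 ≠ [] then
    p.1 ++ [((i : Int) + cs.length - p.2.length, (i : Int) + cs.length - 1, pyIntOf p.2)]
  else p.1

-- what B produces when a partial run `cur` (ending just before cs) is pending
def mergeRun (cur : List Char) (cs : List Char) (i : Nat) : List (Int × Int × Int) :=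
  if cur = [] then altRun cs i
  else
    let t := cs.takeWhile PySem.Chars.isdigit
    ((i : Int) - cur.length, (i : Int) + t.length - 1, pyIntOf (cur ++ t)) ::
      altRun (cs.drop t.length) (i + t.length)

theorem finishA_eq (cs : List Char) : ∀ (i : Nat) (cur : List Char) (res : List (Int × Int × Int)),
    finishA cs i cur res = res ++ mergeRun cur cs i := by
  induction cs with
  | nil =>
    intro i cur res
    by_cases h : cur = []
    · simp [finishA, aGo, mergeRun, h, altRun]
    · simp [finishA, aGo, mergeRun, h, altRun]
  | cons c rest ih =>
    intro i cur res
    by_cases hd : PySem.Chars.isdigit c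
    · have lhs : finishA (c :: rest) i cur res = finishA rest (i + 1) (cur ++ [c]) res := by
        simp only [finishA, aGo, hd, if_pos]
        simp only [List.length_cons]
        push_cast
        ring_nf
      rw [lhs, ih]
      by_cases h : cur = []
      · subst h
        simp only [mergeRun, List.nil_append, if_neg (by simp : ¬([c] = ([] : List Char))),
          reduceIte]
        simp only [altRun, hd, if_pos, List.takeWhile_cons]
        simp only [List.singleton_append, List.length_cons, List.length_nil,
          List.drop_succ_cons]
        push_cast
        ring_nf
      · have h' : ¬(cur ++ [c] = []) := by simp
        simp only [mergeRun, if_neg h, if_neg h', List.takeWhile_cons, hd, if_pos]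
        simp only [List.singleton_append, List.append_assoc, List.length_cons,
          List.length_append, List.length_nil, List.drop_succ_cons]
        push_cast
        ring_nf
    · by_cases h : cur = []
      · have lhs : finishA (c :: rest) i cur res = finishA rest (i + 1) cur res := by
          subst h
          have step : aGo (c :: rest) i [] res = aGo rest (i + 1) [] res := by
            simp [aGo, hd]
          simp only [finishA, step, List.length_cons]
          push_cast
          ring_nf
        rw [lhs, ih]
        subst h
        simp [mergeRun, altRun, hd]
      · have lhs : finishA (c :: rest) i cur res =
            finishA rest (i + 1) []
              (res ++ [((i : Int) - cur.length, (i : Int) - 1, pyIntOf cur)]) := by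
          have step : aGo (c :: rest) i cur res =
              aGo rest (i + 1) []
                (res ++ [((i : Int) - cur.length, (i : Int) - 1, pyIntOf cur)]) := by
            simp [aGo, hd, h]
          simp only [finishA, step, List.length_cons]
          push_cast
          ring_nf
        rw [lhs, ih]
        simp [mergeRun, h, hd, altRun]

theorem ports_agree (s : String) :
    extract_number_positions s = extract_number_positions_alt s := by
  have h := finishA_eq s.toList 0 [] []
  simpa [finishA, mergeRun, extract_number_positions, extract_number_positions_alt] using h

-- ===== VERDICT (by name: the statement is the Claim_ definition above) =====
theorem extract_number_positions_spec : Claim_equal_extract_number_positions := by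
  intro s _
  exact ports_agree s
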